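-- pv_equiv track=rewrite | github.com/lumirevel/baekjoon | baek2388.py | cumulateSum
-- ===== SOURCE A (Python) =====
-- def cumulateSum(compressionChart, compressedCoordinates):
--     prefixSum = []
--     for _ in range(len(compressionChart)):
--         prefixSum.append(0)
--
--     i = len(compressedCoordinates) - 1
--     cumulSum = 0
--     while i >= 0:
--         cumulSum += 1
--         prefixSum[compressedCoordinates[i]] = cumulSum
--         i -= 1
--     return prefixSum
-- ===== SOURCE B (Python) =====
-- def cumulateSum(compressionChart, compressedCoordinates):
--     # Single forward pass: the first write to a slot wins (value n - idx),
--     # instead of A's backward pass that keeps overwriting with a counter.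
--     n = len(compressedCoordinates)
--     prefixSum = [0] * len(compressionChart)
--     for idx, coord in enumerate(compressedCoordinates):
--         if prefixSum[coord] == 0:
--             prefixSum[coord] = n - idx
--     return prefixSum
-- ===== Notes on version B (the rewrite author's own statement) =====
-- stated objective: alternative
-- what changed: A fills the table in a backward pass with a running cumulSum counter, overwriting on duplicates; B makes a single forward pass over enumerate(compressedCoordinates), writing the closed-form value n - idx only into still-empty (zero) slots, so the first occurrence wins without any counter or overwriting.
import Mathlib
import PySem

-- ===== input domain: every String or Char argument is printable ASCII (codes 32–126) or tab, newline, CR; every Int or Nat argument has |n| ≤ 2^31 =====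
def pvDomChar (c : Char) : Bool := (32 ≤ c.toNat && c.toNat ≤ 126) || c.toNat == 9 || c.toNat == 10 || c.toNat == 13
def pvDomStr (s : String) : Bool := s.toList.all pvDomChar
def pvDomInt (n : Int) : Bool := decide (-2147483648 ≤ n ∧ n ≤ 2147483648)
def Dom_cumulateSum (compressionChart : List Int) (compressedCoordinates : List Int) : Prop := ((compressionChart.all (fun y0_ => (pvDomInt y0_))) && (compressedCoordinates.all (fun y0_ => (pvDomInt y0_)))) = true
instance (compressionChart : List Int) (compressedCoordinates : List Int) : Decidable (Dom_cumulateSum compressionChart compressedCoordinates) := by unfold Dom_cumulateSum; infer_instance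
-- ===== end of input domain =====

-- B replaces A's backward index loop with a running counter by a single forward
-- pass over enumerate(coords) where the first write to a slot wins (value n - idx);
-- objective: alternative decomposition, same O(n + m) cost.


-- ===== PORT A =====
-- the 'while i >= 0' loop: state (prefixSum, i, cumulSum)
def cumulateSumLoopA (compressedCoordinates : List Int) (prefixSum : List Int)
    (i : Int) (cumulSum : Int) : List Int :=
  if _h : 0 ≤ i then
    cumulateSumLoopA compressedCoordinates
      (PySem.List.pySetD prefixSum (PySem.List.pyGetD compressedCoordinates i 0) (cumulSum + 1))
      (i - 1) (cumulSum + 1)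
  else prefixSum
termination_by (i + 1).toNat

def cumulateSum (compressionChart : List Int) (compressedCoordinates : List Int) : List Int :=
  -- prefixSum = []; for _ in range(len(compressionChart)): prefixSum.append(0)
  let prefixSum : List Int := (List.range compressionChart.length).foldl (fun ps _ => ps ++ [(0 : Int)]) []
  cumulateSumLoopA compressedCoordinates prefixSum (PySem.List.len compressedCoordinates - 1) 0

-- ===== PORT B =====
def cumulateSum_alt (compressionChart : List Int) (compressedCoordinates : List Int) : List Int :=
  let n : Int := PySem.List.len compressedCoordinates
  let prefixSum : List Int := List.replicate compressionChart.length (0 : Int)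
  -- for idx, coord in enumerate(...): if prefixSum[coord] == 0: prefixSum[coord] = n - idx
  -- (pyGetD/pySetD are exact under Pre_; out of range Python raises IndexError, excluded by Pre_)
  (PySem.List.enumerate compressedCoordinates).foldl
    (fun ps q => if PySem.List.pyGetD ps q.2 0 == 0 then PySem.List.pySetD ps q.2 (n - q.1) else ps)
    prefixSum

-- ===== PRECONDITION & SPEC =====
-- Pre_ excludes exactly the inputs where some coordinate is out of range for
-- prefixSum, on which both Pythons raise IndexError.
def Pre_cumulateSum (compressionChart : List Int) (compressedCoordinates : List Int) : Prop :=
  ∀ c ∈ compressedCoordinates, -(compressionChart.length : Int) ≤ c ∧ c < (compressionChart.length : Int)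
instance (compressionChart : List Int) (compressedCoordinates : List Int) : Decidable (Pre_cumulateSum compressionChart compressedCoordinates) := by unfold Pre_cumulateSum; infer_instance

def pvWitness_cumulateSum : List Int × List Int := ([5, 6, 7], [0, -1, 2, 0])

def Spec_cumulateSum (compressionChart : List Int) (compressedCoordinates : List Int) (out : List Int) : Prop := out = cumulateSum_alt compressionChart compressedCoordinates
instance (compressionChart : List Int) (compressedCoordinates : List Int) (out : List Int) : Decidable (Spec_cumulateSum compressionChart compressedCoordinates out) := by unfold Spec_cumulateSum; infer_instance

-- ===== CLAIM (what is proved, stated in full; the proofs are below) =====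
def Claim_equal_cumulateSum : Prop := ∀ (compressionChart : List Int) (compressedCoordinates : List Int), Dom_cumulateSum compressionChart compressedCoordinates → Pre_cumulateSum compressionChart compressedCoordinates → Spec_cumulateSum compressionChart compressedCoordinates (cumulateSum compressionChart compressedCoordinates)

-- ===== LEMMAS AND PROOFS =====

-- Python's normalised index for an in-range (possibly negative) index c into a list of length L
def posIdx (L : Nat) (c : Int) : Nat := if 0 ≤ c then c.toNat else L - (-c).toNat

-- the first enumerate index whose coordinate lands on slot p
def findFirst (L : Nat) (p : Nat) : List (Int × Int) → Option Int
  | [] => none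
  | q :: rest => if posIdx L q.2 = p then some q.1 else findFirst L p rest

lemma pyIdx_eq_pos (L : Nat) (c : Int) (h1 : -(L : Int) ≤ c) (h2 : c < (L : Int)) :
    PySem.List.pyIdx? L c = some (posIdx L c) := by
  simp only [PySem.List.pyIdx?, posIdx]
  split_ifs <;> simp_all

lemma posIdx_lt (L : Nat) (c : Int) (h1 : -(L : Int) ≤ c) (h2 : c < (L : Int)) :
    posIdx L c < L := by
  simp only [posIdx]; split_ifs <;> omega

lemma setD_eq_set (ps : List Int) (c v : Int)
    (h1 : -(ps.length : Int) ≤ c) (h2 : c < (ps.length : Int)) :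
    PySem.List.pySetD ps c v = ps.set (posIdx ps.length c) v := by
  simp [PySem.List.pySetD, PySem.List.pySet?, pyIdx_eq_pos ps.length c h1 h2]

lemma getD_eq_get (ps : List Int) (c : Int)
    (h1 : -(ps.length : Int) ≤ c) (h2 : c < (ps.length : Int)) :
    PySem.List.pyGetD ps c 0 = ps[posIdx ps.length c]'(posIdx_lt ps.length c h1 h2) := by
  simp [PySem.List.pyGetD, PySem.List.pyGet?, pyIdx_eq_pos ps.length c h1 h2,
    List.getElem?_eq_getElem (posIdx_lt ps.length c h1 h2)]

lemma length_foldrA (n : Int) (e : List (Int × Int)) (ps : List Int) :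
    (e.foldr (fun q ps => PySem.List.pySetD ps q.2 (n - q.1)) ps).length = ps.length := by
  induction e with
  | nil => rfl
  | cons q rest ih => simp [List.foldr_cons, PySem.List.length_pySetD, ih]

-- characterisation of A's backward overwrite pass, elementwise
lemma foldrA_getElem? (n : Int) (e : List (Int × Int)) (ps : List Int)
    (hr : ∀ q ∈ e, -(ps.length : Int) ≤ q.2 ∧ q.2 < (ps.length : Int)) (p : Nat) :
    (e.foldr (fun q ps => PySem.List.pySetD ps q.2 (n - q.1)) ps)[p]? =
      (match findFirst ps.length p e with
       | some j => some (n - j)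
       | none => ps[p]?) := by
  induction e with
  | nil => rfl
  | cons q rest ih =>
    have hq := hr q (by simp)
    have hlen := length_foldrA n rest ps
    have hpos := posIdx_lt ps.length q.2 hq.1 hq.2
    simp only [List.foldr_cons]
    rw [setD_eq_set _ _ _ (by rw [hlen]; exact hq.1) (by rw [hlen]; exact hq.2), hlen]
    rw [List.getElem?_set]
    by_cases hpq : posIdx ps.length q.2 = p
    · simp [findFirst, hpq, hlen, hpq ▸ hpos]
    · simp only [hpq, findFirst]
      exact ih (fun q hq => hr q (by simp [hq]))

lemma length_foldlB (n : Int) (e : List (Int × Int)) (ps : List Int) :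
    (e.foldl (fun ps q => if PySem.List.pyGetD ps q.2 0 == 0 then PySem.List.pySetD ps q.2 (n - q.1) else ps) ps).length = ps.length := by
  induction e generalizing ps with
  | nil => rfl
  | cons q rest ih =>
    simp only [List.foldl_cons]
    rw [ih]
    split <;> simp [PySem.List.length_pySetD]

-- characterisation of B's forward first-write-wins pass, elementwise
lemma foldlB_getElem? (n : Int) (e : List (Int × Int)) (ps : List Int)
    (hr : ∀ q ∈ e, (-(ps.length : Int) ≤ q.2 ∧ q.2 < (ps.length : Int)) ∧ (0 ≤ q.1 ∧ q.1 < n))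
    (p : Nat) (hp : p < ps.length) :
    (e.foldl (fun ps q => if PySem.List.pyGetD ps q.2 0 == 0 then PySem.List.pySetD ps q.2 (n - q.1) else ps) ps)[p]? =
      (if ps[p]'hp = 0 then
        (match findFirst ps.length p e with
         | some j => some (n - j)
         | none => some 0)
       else ps[p]?) := by
  induction e generalizing ps with
  | nil =>
    simp only [List.foldl_nil, findFirst]
    split
    · rename_i h; simp [List.getElem?_eq_getElem hp, h]
    · rfl
  | cons q rest ih =>
    have hq := (hr q (by simp)).1
    have hj := (hr q (by simp)).2
    have hpos := posIdx_lt ps.length q.2 hq.1 hq.2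
    simp only [List.foldl_cons]
    rw [getD_eq_get ps q.2 hq.1 hq.2]
    by_cases hpq : posIdx ps.length q.2 = p
    · -- this step targets slot p
      by_cases h0 : ps[p]'hp = 0
      · have hg : ps[posIdx ps.length q.2]'hpos = 0 := by
          simp only [hpq] at hpos ⊢; exact h0
        rw [if_pos (by simpa using hg)]
        rw [setD_eq_set _ _ _ hq.1 hq.2]
        rw [ih _ (fun q' hq' => by simpa using hr q' (by simp [hq'])) (by simpa using hp)]
        simp only [List.length_set]
        have hval : (ps.set (posIdx ps.length q.2) (n - q.1))[p]'(by simpa using hp) = n - q.1 := by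
          simp [hpq]
        rw [if_neg (by rw [hval]; omega)]
        rw [List.getElem?_set]
        simp [findFirst, hpq, h0, hp]
      · have hg : ¬ (ps[posIdx ps.length q.2]'hpos == 0) = true := by
          simp only [hpq] at hpos ⊢; simpa using h0
        rw [if_neg hg]
        rw [ih _ (fun q' hq' => hr q' (by simp [hq'])) hp]
        simp [h0]
    · -- this step targets a different slot: value at p unchanged
      split
      · rw [setD_eq_set _ _ _ hq.1 hq.2]
        rw [ih _ (fun q' hq' => by simpa using hr q' (by simp [hq'])) (by simpa using hp)]
        simp only [List.length_set]
        have hval : (ps.set (posIdx ps.length q.2) (n - q.1))[p]'(by simpa using hp) = ps[p]'hp := by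
          simp [hpq]
        have hval? : (ps.set (posIdx ps.length q.2) (n - q.1))[p]? = ps[p]? := by
          rw [List.getElem?_set]; simp [hpq]
        rw [hval, hval?]
        simp only [findFirst, if_neg hpq]
      · rw [ih _ (fun q' hq' => hr q' (by simp [hq'])) hp]
        simp only [findFirst, if_neg hpq]

-- A's append loop builds [0] * len(compressionChart)
lemma initA (L : Nat) :
    (List.range L).foldl (fun ps _ => ps ++ [(0 : Int)]) [] = List.replicate L 0 := by
  induction L with
  | zero => rfl
  | succ L ih => simp [List.range_succ, List.foldl_append, ih, List.replicate_succ']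

-- A's while loop is a foldr over the first k entries of enumerate(coords)
lemma loopA_eq (coords : List Int) (k : Nat) (hk : k ≤ coords.length) :
    ∀ ps : List Int,
    cumulateSumLoopA coords ps ((k : Int) - 1) ((coords.length : Int) - k) =
      ((PySem.List.enumerate coords).take k).foldr
        (fun q ps => PySem.List.pySetD ps q.2 ((coords.length : Int) - q.1)) ps := by
  induction k with
  | zero => intro ps; rw [cumulateSumLoopA]; norm_num
  | succ k ih =>
    intro ps
    rw [cumulateSumLoopA]
    rw [dif_pos (by push_cast; omega)]
    have hge : PySem.List.pyGetD coords ((k : Int) + 1 - 1) 0 = coords[k]'(by omega) := by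
      norm_num
      rw [List.getElem?_eq_getElem (show k < coords.length by omega)]
      rfl
    have hcast : ((k : Int) + 1 - 1 - 1) = (k : Int) - 1 := by ring
    have hcum : (coords.length : Int) - (k + 1) + 1 = (coords.length : Int) - k := by ring
    push_cast
    rw [hge, hcast, hcum, ih (by omega)]
    have htake : (PySem.List.enumerate coords).take (k + 1) =
        (PySem.List.enumerate coords).take k ++ [((k : Int), coords[k]'(by omega))] := by
      rw [List.take_add_one]
      congr 1
      rw [List.getElem?_eq_getElem (by simp [PySem.List.length_enumerate]; omega)]
      simp [PySem.List.getElem_enumerate]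
    rw [htake, List.foldr_append]
    simp

-- ===== VERDICT (by name: the statement is the Claim_ definition above) =====
theorem cumulateSum_spec : Claim_equal_cumulateSum := by
  intro chart coords _hdom hpre
  unfold Spec_cumulateSum cumulateSum cumulateSum_alt
  simp only [PySem.List.len_eq, initA]
  have hloop := loopA_eq coords coords.length le_rfl (List.replicate chart.length 0)
  rw [show (coords.length : Int) - (coords.length : Nat) = 0 by ring] at hloop
  rw [List.take_of_length_le (by rw [PySem.List.length_enumerate])] at hloop
  rw [hloop]
  set L := chart.length with hL
  set ps0 : List Int := List.replicate L 0 with hps0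
  have hlen0 : ps0.length = L := by simp [hps0]
  have hrA : ∀ q ∈ PySem.List.enumerate coords, -(ps0.length : Int) ≤ q.2 ∧ q.2 < (ps0.length : Int) := by
    intro q hq
    rw [PySem.List.mem_enumerate_iff] at hq
    obtain ⟨k, hk, rfl⟩ := hq
    rw [hlen0]
    exact hpre _ (List.getElem_mem hk)
  have hrB : ∀ q ∈ PySem.List.enumerate coords,
      (-(ps0.length : Int) ≤ q.2 ∧ q.2 < (ps0.length : Int)) ∧ (0 ≤ q.1 ∧ q.1 < (coords.length : Int)) := by
    intro q hq
    refine ⟨hrA q hq, ?_⟩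
    rw [PySem.List.mem_enumerate_iff] at hq
    obtain ⟨k, hk, rfl⟩ := hq
    constructor <;> simp [hk]
  apply List.ext_getElem?
  intro p
  by_cases hp : p < L
  · rw [foldrA_getElem? _ _ _ hrA, foldlB_getElem? _ _ _ hrB p (by omega)]
    have h0 : ps0[p]'(by omega) = 0 := by simp [hps0]
    rw [if_pos h0]
    cases h : findFirst ps0.length p (PySem.List.enumerate coords) <;> simp [hps0, hp]
  · rw [List.getElem?_eq_none (by rw [length_foldrA, hlen0]; omega),
        List.getElem?_eq_none (by rw [length_foldlB, hlen0]; omega)]
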